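-- pv_equiv track=rewrite | github.com/Willianan/Interview_Book | huawei/9_提取不重复的整数.py | sovle
-- ===== SOURCE A (Python) =====
-- def sovle(strings):
-- 	list = []
-- 	for i in strings[::-1]:
-- 		if i not in list:
-- 			list.append(i)
-- 	strings1 = ''
-- 	for i in list:
-- 		strings1 += i
-- 	return strings1
-- ===== SOURCE B (Python) =====
-- def sovle(strings):
--     kept = [c for i, c in enumerate(strings) if c not in strings[i + 1:]]
--     return ''.join(reversed(kept))
-- ===== Notes on version B (the rewrite author's own statement) =====
-- stated objective: alternative
-- what changed: B replaces A's reverse-then-dedup-with-a-seen-list pass by a single forward scan keeping each character only at its last occurrence (c not in the remaining suffix), then reverses the kept characters; no seen container and no input reversal are maintained.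
import Mathlib
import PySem

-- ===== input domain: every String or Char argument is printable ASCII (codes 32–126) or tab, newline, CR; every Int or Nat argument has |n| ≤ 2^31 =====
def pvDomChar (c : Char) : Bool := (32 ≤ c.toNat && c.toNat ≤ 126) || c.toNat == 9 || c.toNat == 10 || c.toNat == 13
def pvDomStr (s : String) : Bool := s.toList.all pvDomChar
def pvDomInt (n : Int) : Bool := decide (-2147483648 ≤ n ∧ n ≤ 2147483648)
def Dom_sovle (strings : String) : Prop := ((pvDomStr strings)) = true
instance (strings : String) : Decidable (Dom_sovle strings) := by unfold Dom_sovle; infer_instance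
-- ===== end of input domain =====

-- B: one forward scan keeping each character only at its last occurrence (c ∉ suffix), then reverse — no seen-list and no input reversal (alternative decomposition, same cost).


-- ===== PORT A =====
-- for i in strings[::-1]: if i not in list: list.append(i)  ; then strings1 += i over list
def sovle (strings : String) : String :=
  -- strings[::-1] is the reversed string (PySem.Str.slice?_none_none_neg_one)
  let rev := String.ofList strings.toList.reverse
  let list := rev.toList.foldl (fun acc i => if i ∈ acc then acc else acc ++ [i]) []
  list.foldl (fun strings1 i => strings1.push i) ""

-- ===== PORT B =====
-- kept = [c for i, c in enumerate(strings) if c not in strings[i+1:]] ; ''.join(reversed(kept))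
def sovle_alt (strings : String) : String :=
  let cs := strings.toList
  let kept := ((PySem.List.enumerate cs 0).filter
      (fun ic => decide (ic.2 ∉ PySem.List.slice cs (some (ic.1 + 1)) none))).map (·.2)
  String.ofList kept.reverse

-- ===== PRECONDITION & SPEC =====
def Spec_sovle (strings : String) (out : String) : Prop := out = sovle_alt strings
instance (strings : String) (out : String) : Decidable (Spec_sovle strings out) := by unfold Spec_sovle; infer_instance

-- ===== CLAIM (what is proved, stated in full; the proofs are below) =====
def Claim_equal_sovle : Prop := ∀ (strings : String), Dom_sovle strings → Spec_sovle strings (sovle strings)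

-- ===== LEMMAS AND PROOFS =====

-- structural form of B's kept list: keep c iff it does not reappear later
def pvKf : List Char → List Char
  | [] => []
  | c :: t => if c ∈ t then pvKf t else c :: pvKf t

lemma pvMem_kf (t : List Char) (x : Char) : x ∈ pvKf t ↔ x ∈ t := by
  induction t with
  | nil => simp [pvKf]
  | cons c t ih =>
    by_cases hc : c ∈ t
    · rw [show pvKf (c :: t) = pvKf t from if_pos hc, ih, List.mem_cons]
      constructor
      · tauto
      · rintro (rfl | h) <;> [exact hc; exact h]
    · rw [show pvKf (c :: t) = c :: pvKf t from if_neg hc]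
      simp [ih]

lemma pvKept_eq (t : List Char) : ∀ (full : List Char) (s : ℕ), full.drop s = t →
    ((PySem.List.enumerate t (s : Int)).filter
      (fun ic => decide (ic.2 ∉ PySem.List.slice full (some (ic.1 + 1)) none))).map (·.2) = pvKf t := by
  induction t with
  | nil =>
    intro full s _
    rw [PySem.List.enumerate_nil]
    rfl
  | cons c t ih =>
    intro full s hd
    have hd1 : full.drop (s + 1) = t := by
      rw [← List.tail_drop, hd]; rfl
    rw [PySem.List.enumerate_cons, List.filter_cons]
    have hs : PySem.List.slice full (some (((s + 1 : ℕ) : Int))) none = t := by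
      rw [PySem.List.slice_from_natCast]; exact hd1
    push_cast at hs
    have hrec := ih full (s + 1) hd1
    push_cast at hrec
    by_cases hc : c ∈ t
    · simpa [hs, hc, pvKf] using hrec
    · simpa [hs, hc, pvKf] using hrec

-- A's dedup fold
def pvDf (acc l : List Char) : List Char :=
  l.foldl (fun acc i => if i ∈ acc then acc else acc ++ [i]) acc

lemma pvDf_append (acc l : List Char) (c : Char) :
    pvDf acc (l ++ [c]) = if c ∈ pvDf acc l then pvDf acc l else pvDf acc l ++ [c] := by
  simp [pvDf, List.foldl_append]

lemma pvMain (t : List Char) : pvDf [] t.reverse = (pvKf t).reverse := by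
  induction t with
  | nil => simp [pvDf, pvKf]
  | cons c t ih =>
    by_cases hc : c ∈ t
    · simp [List.reverse_cons, pvDf_append, hc, pvKf, ih, pvMem_kf]
    · simp [List.reverse_cons, pvDf_append, hc, pvKf, ih, pvMem_kf]

lemma pvPush_fold (l : List Char) : ∀ (s : String), l.foldl (fun s1 i => s1.push i) s = String.ofList (s.toList ++ l) := by
  induction l with
  | nil => intro s; simp
  | cons c t ih =>
    intro s
    simp only [List.foldl_cons, ih]
    congr 1
    simp

-- ===== VERDICT (by name: the statement is the Claim_ definition above) =====
theorem sovle_spec : Claim_equal_sovle := by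
  intro strings _
  unfold Spec_sovle sovle sovle_alt
  simp only
  rw [show ∀ l : List Char, l.foldl (fun acc i => if i ∈ acc then acc else acc ++ [i]) [] = pvDf [] l from fun _ => rfl]
  have hk := pvKept_eq strings.toList strings.toList 0 (by simp)
  push_cast at hk
  rw [pvPush_fold, hk]
  simp [pvMain strings.toList]
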